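-- pv_equiv track=rewrite | github.com/Bcfg2/bcfg2 | testsuite/common.py | _count_diff_all_purpose
-- ===== SOURCE A (Python) =====
-- def _count_diff_all_purpose(actual, expected):
--     '''Returns list of (cnt_act, cnt_exp, elem) triples where the
--     counts differ'''
--     # elements need not be hashable
--     s, t = list(actual), list(expected)
--     m, n = len(s), len(t)
--     NULL = object()
--     result = []
--     for i, elem in enumerate(s):
--         if elem is NULL:
--             continue
--         cnt_s = cnt_t = 0
--         for j in range(i, m):
--             if s[j] == elem:
--                 cnt_s += 1
--                 s[j] = NULL
--         for j, other_elem in enumerate(t):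
--             if other_elem == elem:
--                 cnt_t += 1
--                 t[j] = NULL
--         if cnt_s != cnt_t:
--             diff = (cnt_s, cnt_t, elem)
--             result.append(diff)
--
--     for i, elem in enumerate(t):
--         if elem is NULL:
--             continue
--         cnt_t = 0
--         for j in range(i, n):
--             if t[j] == elem:
--                 cnt_t += 1
--                 t[j] = NULL
--         diff = (0, cnt_t, elem)
--         result.append(diff)
--     return result
-- ===== SOURCE B (Python) =====
-- def _count_diff_all_purpose(actual, expected):
--     '''Returns list of (cnt_act, cnt_exp, elem) triples where the
--     counts differ'''
--     s, t = list(actual), list(expected)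
--     result = []
--     seen = []
--     for elem in s:
--         if any(x == elem for x in seen):
--             continue
--         seen.append(elem)
--         cnt_s = sum(1 for x in s if x == elem)
--         cnt_t = sum(1 for x in t if x == elem)
--         if cnt_s != cnt_t:
--             result.append((cnt_s, cnt_t, elem))
--     for elem in t:
--         if any(x == elem for x in seen):
--             continue
--         seen.append(elem)
--         result.append((0, sum(1 for x in t if x == elem), elem))
--     return result
-- ===== Notes on version B (the rewrite author's own statement) =====
-- stated objective: alternative
-- what changed: Replaces A's destructive sentinel-marking (overwriting matched slots with NULL in mutated copies and counting over partial suffixes) with a non-mutating dedup-by-seen scheme: a `seen` list of already-processed distinct elements plus full count rescans of the untouched inputs.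
import Mathlib
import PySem

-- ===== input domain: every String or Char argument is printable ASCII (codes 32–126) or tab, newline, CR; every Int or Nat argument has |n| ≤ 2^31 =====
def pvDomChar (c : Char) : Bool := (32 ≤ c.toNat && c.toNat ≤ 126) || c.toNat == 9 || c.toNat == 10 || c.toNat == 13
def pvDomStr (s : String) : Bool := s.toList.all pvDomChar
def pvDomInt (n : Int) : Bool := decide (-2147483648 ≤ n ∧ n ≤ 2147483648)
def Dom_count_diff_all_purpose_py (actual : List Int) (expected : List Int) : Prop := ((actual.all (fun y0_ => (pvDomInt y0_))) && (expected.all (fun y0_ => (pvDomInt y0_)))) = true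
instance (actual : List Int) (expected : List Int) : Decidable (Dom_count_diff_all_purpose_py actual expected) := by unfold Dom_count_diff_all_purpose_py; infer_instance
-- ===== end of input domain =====

-- B replaces A's sentinel-marking (NULL-ing matched slots, partial rescans over the mutated
-- copies) by a `seen` list of processed elements plus full count rescans; objective: alternative
-- (same O(n*m) cost, no mutation). A mutates only its local copies, so no observable side effect.


-- ===== PORT A =====
-- The NULL sentinel is modelled by Option: `none` = a slot overwritten with NULL
-- (`s[j] == elem` is False when s[j] is NULL, exactly `none == some e`).
-- 'for j in range(i, m): if s[j] == elem: cnt += 1; s[j] = NULL' — one left-to-right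
-- pass over the remaining slots, counting matches and NULL-ing them:
def pvMarkCount (e : Int) (cnt : Int) : List (Option Int) → Int × List (Option Int)
  | [] => (cnt, [])
  | x :: xs =>
    if x == some e then
      let r := pvMarkCount e (cnt + 1) xs
      (r.1, none :: r.2)
    else
      let r := pvMarkCount e cnt xs
      (r.1, x :: r.2)

theorem pvMarkCount_len (e : Int) : ∀ (xs : List (Option Int)) (c : Int),
    (pvMarkCount e c xs).2.length = xs.length := by
  intro xs
  induction xs with
  | nil => intro c; simp [pvMarkCount]
  | cons x xs ih => intro c; unfold pvMarkCount; split <;> simp [ih]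

-- first loop: 'for i, elem in enumerate(s)'; every slot before i is already NULL and is
-- never read again, so the loop is the obvious recursion on the remaining suffix of s,
-- threading the (whole) mutated t and the result.
def pvLoopA1 : List (Option Int) → List (Option Int) → List (Int × Int × Int) →
    List (Int × Int × Int) × List (Option Int)
  | [], t, res => (res, t)
  | none :: rest, t, res => pvLoopA1 rest t res
  | some e :: rest, t, res =>
    let rs := pvMarkCount e 1 rest          -- j = i hits s[i] == elem itself: counted and NULLed
    let rt := pvMarkCount e 0 t
    pvLoopA1 rs.2 rt.2 (if rs.1 ≠ rt.1 then res ++ [(rs.1, rt.1, e)] else res)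
termination_by s _ _ => s.length
decreasing_by
  · simp
  · simp [pvMarkCount_len]

-- second loop: 'for i, elem in enumerate(t)', unconditional append of (0, cnt_t, elem)
def pvLoopA2 : List (Option Int) → List (Int × Int × Int) → List (Int × Int × Int)
  | [], res => res
  | none :: rest, res => pvLoopA2 rest res
  | some e :: rest, res =>
    let rt := pvMarkCount e 1 rest
    pvLoopA2 rt.2 (res ++ [(0, rt.1, e)])
termination_by s _ => s.length
decreasing_by
  · simp
  · simp [pvMarkCount_len]

def count_diff_all_purpose_py (actual : List Int) (expected : List Int) : List (Int × Int × Int) :=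
  let r := pvLoopA1 (actual.map some) (expected.map some) []
  pvLoopA2 r.2 r.1

-- ===== PORT B =====
-- 'sum(1 for x in xs if x == e)'
def pvCnt (e : Int) (xs : List Int) : Int := (xs.countP (fun x => x == e) : Int)

-- first B loop over s, threading `seen` and the result
def pvGoB1 (act exp : List Int) : List Int → List Int → List (Int × Int × Int) →
    List Int × List (Int × Int × Int)
  | [], seen, res => (seen, res)
  | e :: xs, seen, res =>
    if seen.any (fun x => x == e) then pvGoB1 act exp xs seen res
    else pvGoB1 act exp xs (seen ++ [e])
      (if pvCnt e act ≠ pvCnt e exp then res ++ [(pvCnt e act, pvCnt e exp, e)] else res)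

-- second B loop over t
def pvGoB2 (exp : List Int) : List Int → List Int → List (Int × Int × Int) →
    List Int × List (Int × Int × Int)
  | [], seen, res => (seen, res)
  | e :: xs, seen, res =>
    if seen.any (fun x => x == e) then pvGoB2 exp xs seen res
    else pvGoB2 exp xs (seen ++ [e]) (res ++ [(0, pvCnt e exp, e)])

def count_diff_all_purpose_py_alt (actual : List Int) (expected : List Int) : List (Int × Int × Int) :=
  let r1 := pvGoB1 actual expected actual [] []
  (pvGoB2 expected expected r1.1 r1.2).2

-- ===== PRECONDITION & SPEC =====
def Spec_count_diff_all_purpose_py (actual : List Int) (expected : List Int) (out : List (Int × Int × Int)) : Prop := out = count_diff_all_purpose_py_alt actual expected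
instance (actual : List Int) (expected : List Int) (out : List (Int × Int × Int)) : Decidable (Spec_count_diff_all_purpose_py actual expected out) := by unfold Spec_count_diff_all_purpose_py; infer_instance

-- ===== CLAIM (what is proved, stated in full; the proofs are below) =====
def Claim_equal_count_diff_all_purpose_py : Prop := ∀ (actual : List Int) (expected : List Int), Dom_count_diff_all_purpose_py actual expected → Spec_count_diff_all_purpose_py actual expected (count_diff_all_purpose_py actual expected)

-- ===== LEMMAS AND PROOFS =====

-- A's mutated lists are the original lists with already-seen elements NULLed out:
def pvMaskE (seen : List Int) (x : Int) : Option Int :=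
  if seen.any (fun y => y == x) then none else some x

def pvMask (seen : List Int) (xs : List Int) : List (Option Int) := xs.map (pvMaskE seen)

theorem pvMask_nil (xs : List Int) : pvMask [] xs = xs.map some := by
  simp [pvMask, pvMaskE]

theorem pvMaskE_grow_ne (seen : List Int) (e x : Int) (hx : x ≠ e) :
    pvMaskE (seen ++ [e]) x = pvMaskE seen x := by
  have : (e == x) = false := by simpa using fun h => hx h.symm
  simp [pvMaskE, this]

theorem pvMarkCount_mask (e : Int) (seen : List Int)
    (he : seen.any (fun y => y == e) = false) :
    ∀ (xs : List Int) (c : Int),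
      pvMarkCount e c (pvMask seen xs)
        = (c + (xs.countP (fun x => x == e) : Int), pvMask (seen ++ [e]) xs) := by
  intro xs
  induction xs with
  | nil => intro c; simp [pvMarkCount, pvMask]
  | cons x xs ih =>
    intro c
    simp only [pvMask] at ih ⊢
    by_cases hx : x = e
    · subst hx
      have h1 : pvMaskE seen x = some x := by simp [pvMaskE, he]
      have h2 : pvMaskE (seen ++ [x]) x = none := by simp [pvMaskE]
      simp only [List.map_cons, h1, h2]
      simp only [pvMarkCount, beq_self_eq_true, if_true]
      rw [ih (c + 1)]
      simp only [List.countP_cons, beq_self_eq_true, if_true]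
      congr 1
      push_cast
      ring
    · have hhead : (pvMaskE seen x == some e) = false := by
        unfold pvMaskE; split <;> simp [hx]
      simp only [List.map_cons]
      simp only [pvMarkCount, hhead, Bool.false_eq_true, if_false]
      rw [ih c, pvMaskE_grow_ne seen e x hx]
      simp [hx]

theorem pvLoopA1_eq (act exp : List Int) :
    ∀ (suf pre seen : List Int) (res : List (Int × Int × Int)),
      act = pre ++ suf →
      (∀ a ∈ pre, seen.any (fun y => y == a) = true) →
      pvLoopA1 (pvMask seen suf) (pvMask seen exp) res
        = ((pvGoB1 act exp suf seen res).2, pvMask (pvGoB1 act exp suf seen res).1 exp) := by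
  intro suf
  induction suf with
  | nil => intro pre seen res hact hpre; simp [pvMask, pvLoopA1, pvGoB1]
  | cons x xs ih =>
    intro pre seen res hact hpre
    by_cases h : seen.any (fun y => y == x) = true
    · have hmask : pvMaskE seen x = none := by simp [pvMaskE, h]
      simp only [pvMask, List.map_cons, hmask]
      simp only [pvLoopA1, pvGoB1, h, if_true]
      have := ih (pre ++ [x]) seen res (by simp [hact]) (by
        intro a ha
        rcases List.mem_append.1 ha with ha | ha
        · exact hpre a ha
        · simp only [List.mem_singleton] at ha; subst ha; exact h)
      simpa [pvMask] using this
    · have h' : seen.any (fun y => y == x) = false := by simp only [Bool.not_eq_true] at h; exact h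
      have hmask : pvMaskE seen x = some x := by simp [pvMaskE, h']
      have hxpre : x ∉ pre := by
        intro hmem
        have hT := hpre x hmem
        simp [hT] at h'
      have h0 : pre.countP (fun y => y == x) = 0 := by
        rw [List.countP_eq_zero]
        intro a ha
        simp only [beq_iff_eq]
        intro hax; exact hxpre (hax ▸ ha)
      have hcntact : (1 : Int) + (xs.countP (fun y => y == x) : Int) = pvCnt x act := by
        rw [hact]
        simp only [pvCnt, List.countP_append, List.countP_cons, h0, beq_self_eq_true, if_true]
        push_cast
        ring
      have hct : (0 : Int) + (exp.countP (fun y => y == x) : Int) = pvCnt x exp := by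
        simp [pvCnt]
      simp only [pvMask, List.map_cons, hmask]
      simp only [pvLoopA1]
      rw [show (List.map (pvMaskE seen) xs) = pvMask seen xs from rfl,
        show (List.map (pvMaskE seen) exp) = pvMask seen exp from rfl]
      rw [pvMarkCount_mask x seen h' xs 1]
      rw [pvMarkCount_mask x seen h' exp 0]
      simp only [pvGoB1, h', Bool.false_eq_true, if_false]
      rw [hcntact, hct]
      have := ih (pre ++ [x]) (seen ++ [x])
        (if pvCnt x act ≠ pvCnt x exp then res ++ [(pvCnt x act, pvCnt x exp, x)] else res)
        (by simp [hact]) (by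
          intro a ha
          rcases List.mem_append.1 ha with ha | ha
          · have := hpre a ha
            simp only [List.any_append, this, Bool.true_or]
          · simp only [List.mem_singleton] at ha; subst ha; simp)
      simpa [pvMask] using this

theorem pvLoopA2_eq (exp : List Int) :
    ∀ (suf pre seen : List Int) (res : List (Int × Int × Int)),
      exp = pre ++ suf →
      (∀ a ∈ pre, seen.any (fun y => y == a) = true) →
      pvLoopA2 (pvMask seen suf) res = (pvGoB2 exp suf seen res).2 := by
  intro suf
  induction suf with
  | nil => intro pre seen res hexp hpre; simp [pvMask, pvLoopA2, pvGoB2]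
  | cons x xs ih =>
    intro pre seen res hexp hpre
    by_cases h : seen.any (fun y => y == x) = true
    · have hmask : pvMaskE seen x = none := by simp [pvMaskE, h]
      simp only [pvMask, List.map_cons, hmask]
      simp only [pvLoopA2, pvGoB2, h, if_true]
      have := ih (pre ++ [x]) seen res (by simp [hexp]) (by
        intro a ha
        rcases List.mem_append.1 ha with ha | ha
        · exact hpre a ha
        · simp only [List.mem_singleton] at ha; subst ha; exact h)
      simpa [pvMask] using this
    · have h' : seen.any (fun y => y == x) = false := by simp only [Bool.not_eq_true] at h; exact h
      have hmask : pvMaskE seen x = some x := by simp [pvMaskE, h']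
      have hxpre : x ∉ pre := by
        intro hmem
        have hT := hpre x hmem
        simp [hT] at h'
      have h0 : pre.countP (fun y => y == x) = 0 := by
        rw [List.countP_eq_zero]
        intro a ha
        simp only [beq_iff_eq]
        intro hax; exact hxpre (hax ▸ ha)
      have hcnt : (1 : Int) + (xs.countP (fun y => y == x) : Int) = pvCnt x exp := by
        rw [hexp]
        simp only [pvCnt, List.countP_append, List.countP_cons, h0, beq_self_eq_true, if_true]
        push_cast
        ring
      simp only [pvMask, List.map_cons, hmask]
      simp only [pvLoopA2]
      rw [show (List.map (pvMaskE seen) xs) = pvMask seen xs from rfl]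
      rw [pvMarkCount_mask x seen h' xs 1]
      simp only [pvGoB2, h', Bool.false_eq_true, if_false]
      rw [hcnt]
      have := ih (pre ++ [x]) (seen ++ [x]) (res ++ [(0, pvCnt x exp, x)])
        (by simp [hexp]) (by
          intro a ha
          rcases List.mem_append.1 ha with ha | ha
          · have := hpre a ha
            simp only [List.any_append, this, Bool.true_or]
          · simp only [List.mem_singleton] at ha; subst ha; simp)
      simpa [pvMask] using this

-- ===== VERDICT (by name: the statement is the Claim_ definition above) =====
theorem count_diff_all_purpose_py_spec : Claim_equal_count_diff_all_purpose_py := by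
  intro actual expected _
  unfold Spec_count_diff_all_purpose_py count_diff_all_purpose_py count_diff_all_purpose_py_alt
  rw [← pvMask_nil actual, ← pvMask_nil expected]
  rw [pvLoopA1_eq actual expected actual [] [] [] (by simp) (by simp)]
  exact pvLoopA2_eq expected expected [] _ _ (by simp) (by simp)
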